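-- pv_equiv track=rewrite | github.com/virenderox/Striver-SDE-Sheet-DSA | Array/easy/Union of two array/main.py | doUnion
-- ===== SOURCE A (Python) =====
-- def doUnion(a,n,b,m):
--
--     total_list = a + b
--     union = 0
--     dic = {}
--     for val in total_list :
--
--         if val not in dic:
--             dic[val] = True
--             union += 1
--
--     return union
-- ===== SOURCE B (Python) =====
-- def doUnion(a, n, b, m):
--     t = sorted(a + b)
--     if not t:
--         return 0
--     return 1 + sum(1 for x, y in zip(t, t[1:]) if x != y)
-- ===== Notes on version B (the rewrite author's own statement) =====
-- stated objective: alternative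
-- what changed: Replaces the dict-membership counting loop with sort-then-adjacent-compare: sort a+b once and return 1 plus the number of positions where consecutive sorted values differ (0 when empty).
import Mathlib
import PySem

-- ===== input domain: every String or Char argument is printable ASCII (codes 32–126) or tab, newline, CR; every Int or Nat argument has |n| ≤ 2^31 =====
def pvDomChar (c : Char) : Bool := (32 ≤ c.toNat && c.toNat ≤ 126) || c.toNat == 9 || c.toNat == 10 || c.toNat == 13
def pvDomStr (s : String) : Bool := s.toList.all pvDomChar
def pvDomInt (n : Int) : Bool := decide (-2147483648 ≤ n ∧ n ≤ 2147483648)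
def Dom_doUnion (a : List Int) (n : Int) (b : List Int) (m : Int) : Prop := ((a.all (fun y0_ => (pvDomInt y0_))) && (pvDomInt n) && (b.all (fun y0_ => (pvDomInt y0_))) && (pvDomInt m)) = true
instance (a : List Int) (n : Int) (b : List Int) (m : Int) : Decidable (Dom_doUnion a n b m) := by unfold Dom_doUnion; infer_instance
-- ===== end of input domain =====

-- B replaces A's dict-membership counting loop with sort-then-adjacent-compare (alternative algorithm, same result).


-- ===== PORT A =====
-- loop body: check membership in the dict, then record and count
def doUnionStep (s : Int × PySem.Dict Int Bool) (val : Int) : Int × PySem.Dict Int Bool :=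
  if s.2.contains val = false then (s.1 + 1, s.2.insert val true) else s

def doUnion (a : List Int) (n : Int) (b : List Int) (m : Int) : Int :=
  let total_list := a ++ b
  (total_list.foldl doUnionStep (0, PySem.Dict.empty)).1

-- ===== PORT B =====
-- zip(t, t[1:]) with the generator-sum: number of adjacent pairs that differ
def doUnion_alt (a : List Int) (n : Int) (b : List Int) (m : Int) : Int :=
  let t := PySem.List.sorted (a ++ b) (fun x => x) false
  match t with
  | [] => 0
  | _ => 1 + (((t.zip (PySem.List.slice t (some 1) none)).countP (fun p => p.1 != p.2) : Nat) : Int)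

-- ===== PRECONDITION & SPEC =====
def Spec_doUnion (a : List Int) (n : Int) (b : List Int) (m : Int) (out : Int) : Prop := out = doUnion_alt a n b m
instance (a : List Int) (n : Int) (b : List Int) (m : Int) (out : Int) : Decidable (Spec_doUnion a n b m out) := by unfold Spec_doUnion; infer_instance

-- ===== CLAIM (what is proved, stated in full; the proofs are below) =====
def Claim_equal_doUnion : Prop := ∀ (a : List Int) (n : Int) (b : List Int) (m : Int), Dom_doUnion a n b m → Spec_doUnion a n b m (doUnion a n b m)

-- ===== LEMMAS AND PROOFS =====

-- card (insert a s) seen as 1 + card of s without a (works whether or not a ∈ s)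
theorem card_insert_erase (s : Finset Int) (a : Int) :
    (insert a s).card = 1 + (s.erase a).card := by
  by_cases h : a ∈ s
  · rw [Finset.card_insert_of_mem h, Finset.card_erase_of_mem h]
    have := Finset.card_pos.mpr ⟨a, h⟩; omega
  · rw [Finset.card_insert_of_notMem h, Finset.erase_eq_of_notMem h]; omega

-- A's loop counts the distinct new elements: exactly those of l.toFinset the dict does not yet contain
theorem doUnion_foldl (l : List Int) : ∀ (c : Int) (d : PySem.Dict Int Bool),
    (l.foldl doUnionStep (c, d)).1
      = c + ((l.toFinset.filter (fun v => d.contains v = false)).card : Int) := by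
  induction l with
  | nil => intro c d; simp
  | cons x xs ih =>
    intro c d
    simp only [List.foldl_cons, doUnionStep]
    by_cases h : d.contains x = false
    · rw [if_pos h, ih]
      have hfilt : ((x :: xs).toFinset.filter (fun v => d.contains v = false))
          = insert x (xs.toFinset.filter (fun v => d.contains v = false)) := by
        simp [List.toFinset_cons, Finset.filter_insert, h]
      have hfilt2 : (xs.toFinset.filter (fun v => (d.insert x true).contains v = false))
          = (xs.toFinset.filter (fun v => d.contains v = false)).erase x := by
        ext v
        simp only [Finset.mem_filter, Finset.mem_erase, PySem.Dict.contains_insert]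
        constructor
        · rintro ⟨hv, hc⟩
          simp only [Bool.or_eq_false_iff, beq_eq_false_iff_ne] at hc
          exact ⟨hc.1, hv, hc.2⟩
        · rintro ⟨hne, hv, hc⟩
          refine ⟨hv, ?_⟩
          simp [hc, hne]
      rw [hfilt2, hfilt, card_insert_erase]
      push_cast; ring
    · rw [if_neg h, ih]
      have : ((x :: xs).toFinset.filter (fun v => d.contains v = false))
          = (xs.toFinset.filter (fun v => d.contains v = false)) := by
        simp only [Bool.not_eq_false] at h
        simp [List.toFinset_cons, Finset.filter_insert, h]
      rw [this]

-- on a nonempty ≤-sorted list, 1 + (number of adjacent pairs that differ) = number of distinct elements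
theorem adj_count_sorted (l : List Int) : l.Pairwise (· ≤ ·) → l ≠ [] →
    1 + (((l.zip l.tail).countP (fun p => p.1 != p.2) : Nat) : Int) = (l.toFinset.card : Int) := by
  induction l with
  | nil => intro _ h; exact absurd rfl h
  | cons x xs ih =>
    intro hpw _
    cases xs with
    | nil => simp
    | cons y rest =>
      have hxle := (List.pairwise_cons.mp hpw).1
      have hpw' := (List.pairwise_cons.mp hpw).2
      have ihv := ih hpw' (by simp)
      simp only [List.tail_cons, List.zip_cons_cons, List.countP_cons] at ihv ⊢
      by_cases hxy : x = y
      · subst hxy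
        have hcard : ((x :: x :: rest).toFinset.card) = ((x :: rest).toFinset.card) := by
          simp [List.toFinset_cons]
        rw [hcard, ← ihv]
        simp
      · have hnot : x ∉ (y :: rest).toFinset := by
          simp only [List.mem_toFinset]
          intro hmem
          have hlt : x < y := lt_of_le_of_ne (hxle y (by simp)) hxy
          rcases List.mem_cons.mp hmem with h | h
          · omega
          · have := (List.pairwise_cons.mp hpw').1 x h
            omega
        have hcard : ((x :: y :: rest).toFinset.card) = (y :: rest).toFinset.card + 1 := by
          rw [List.toFinset_cons, Finset.card_insert_of_notMem hnot]
        have hb : (x != y) = true := by simpa using hxy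
        simp only [hcard, hb, if_true]
        push_cast
        omega

-- ===== VERDICT (by name: the statement is the Claim_ definition above) =====
theorem doUnion_spec : Claim_equal_doUnion := by
  intro a n b m _
  show doUnion a n b m = doUnion_alt a n b m
  unfold doUnion doUnion_alt
  rw [doUnion_foldl]
  have hpw := PySem.List.sorted_pairwise (a ++ b) (fun x => x)
  have hperm := PySem.List.sorted_perm (a ++ b) (fun x => x) false
  have hfs : (PySem.List.sorted (a ++ b) (fun x => x) false).toFinset = (a ++ b).toFinset :=
    List.toFinset_eq_of_perm _ _ hperm
  cases hcase : PySem.List.sorted (a ++ b) (fun x => x) false with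
  | nil =>
    rw [hcase] at hperm
    have hnil : a ++ b = [] := (hperm.symm).eq_nil
    simp [hnil]
  | cons x xs =>
    rw [hcase] at hpw hfs
    simp only [PySem.List.slice_from_one, List.tail_cons]
    have h := adj_count_sorted (x :: xs) hpw (by simp)
    rw [List.tail_cons] at h
    rw [h, hfs]
    simp [PySem.Dict.contains_empty]
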